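-- pv_equiv track=rewrite | github.com/vintagevikas090/Programming_InterviewBit | Array/Reorder Data in Log Files.py | reorderLogs
-- ===== SOURCE A (Python) =====
-- def reorderLogs(A):
--     def is_digit_log(log):
--         log_info = log.split("-", 1)[1]
--         # if log_info has digits -> return true
--         if log_info[0].isdigit():
--             return True
--         else:
--             return False
--
--     def log_key(log):
--         identifier, content = log.split("-", 1)
--         return (content, identifier)
--
--     letter_logs = []
--     digit_logs = []
--
--     for log in A:
--         if is_digit_log(log):
--             digit_logs.append(log)
--         else:
--             letter_logs.append(log)
--
--
--     '''Apply log_key to Each Log: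
--         For each log in letter_logs, log_key(log) is called.
--         This converts each log into a tuple (content, identifier).
--         so sorting will be done based of 1st ele of tuple -> i.e content
--     '''
--     letter_logs.sort(key=log_key)
--     return letter_logs + digit_logs
-- ===== SOURCE B (Python) =====
-- def reorderLogs(A):
--     # One stable sorted() pass over the whole list instead of partition + sort + concat.
--     # String keys: letter-logs get "0"+content (so they collate before every digit-log,
--     # whose key is "1"), digit-logs all share the same key so stability keeps input order.
--     def key(log):
--         identifier, content = log.split("-", 1)
--         if content[0].isdigit():
--             return ("1", "")
--         return ("0" + content, identifier)
--     return sorted(A, key=key)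
-- ===== Notes on version B (the rewrite author's own statement) =====
-- stated objective: idiomatic
-- what changed: Replaces the partition loop + separate letter-log sort + concatenation with a single stable sorted(A, key=...) call whose string key collates letter-logs (by content then identifier) before digit-logs and keeps digit-logs in input order by stability.
import Mathlib
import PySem

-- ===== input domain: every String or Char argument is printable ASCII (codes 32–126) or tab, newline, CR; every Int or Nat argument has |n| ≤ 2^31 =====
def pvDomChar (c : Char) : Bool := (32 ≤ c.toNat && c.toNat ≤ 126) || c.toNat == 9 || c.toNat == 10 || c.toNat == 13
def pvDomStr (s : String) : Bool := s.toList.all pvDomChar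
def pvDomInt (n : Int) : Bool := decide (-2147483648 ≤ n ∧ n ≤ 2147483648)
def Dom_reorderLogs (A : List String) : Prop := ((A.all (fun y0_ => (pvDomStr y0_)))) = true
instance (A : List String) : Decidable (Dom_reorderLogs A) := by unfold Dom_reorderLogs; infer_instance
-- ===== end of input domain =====

-- B replaces A's partition loop + separate letter-log sort + concatenation by ONE stable
-- sorted(A, key=...) call with a string key collating letter-logs before digit-logs (idiomatic).

-- ===== PORT A =====
-- log.split("-", 1)  (sep is non-empty, so splitMax? is always `some`)
def pvSplit1 (log : String) : List String := (PySem.Str.splitMax? log "-" 1).getD []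

-- is_digit_log: log.split("-",1)[1][0].isdigit(); the `none` branches are Python's
-- IndexError (no "-" in log / empty content) — those inputs are outside Pre_.
def pvIsDigitLog (log : String) : Bool :=
  match PySem.List.pyGet? (pvSplit1 log) 1 with
  | some info =>
    match PySem.Str.pyGet? info 0 with
    | some c => PySem.Str.isdigit c
    | none => false
  | none => false

-- log_key: identifier, content = log.split("-", 1); the getD "" is Python's ValueError
-- on a log without "-" — outside Pre_.
def pvLogContent (log : String) : String := (PySem.List.pyGet? (pvSplit1 log) 1).getD ""
def pvLogIdent (log : String) : String := (PySem.List.pyGet? (pvSplit1 log) 0).getD ""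

def reorderLogs (A : List String) : List String :=
  let p := A.foldl (fun (acc : List String × List String) log =>
      if pvIsDigitLog log then (acc.1, acc.2 ++ [log]) else (acc.1 ++ [log], acc.2)) ([], [])
  PySem.List.sorted2 p.1 pvLogContent pvLogIdent ++ p.2

-- ===== PORT B =====
-- identifier, content = log.split("-", 1)   (same raising behaviour as A, outside Pre_)
def altSplit (log : String) : List String := (PySem.Str.splitMax? log "-" 1).getD []
def altIdent (log : String) : String := (PySem.List.pyGet? (altSplit log) 0).getD ""
def altContent (log : String) : String := (PySem.List.pyGet? (altSplit log) 1).getD ""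

-- content[0].isdigit()
def altIsDigit (log : String) : Bool :=
  match PySem.Str.pyGet? (altContent log) 0 with
  | some c => PySem.Str.isdigit c
  | none => false

-- key(log) = ("1", "") for digit-logs, ("0" + content, identifier) for letter-logs
def altKey1 (log : String) : String := if altIsDigit log then "1" else "0" ++ altContent log
def altKey2 (log : String) : String := if altIsDigit log then "" else altIdent log

def reorderLogs_alt (A : List String) : List String :=
  PySem.List.sorted2 A altKey1 altKey2

-- ===== PRECONDITION & SPEC =====
-- Pre_ excludes exactly the logs on which the Python raises: a log without "-" (IndexError in
-- is_digit_log / ValueError unpacking log_key) and a log whose content after the first "-" is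
-- empty (IndexError on content[0]).
def Pre_reorderLogs (A : List String) : Prop :=
  ∀ log ∈ A, ((PySem.Str.splitMax? log "-" 1).getD []).length = 2 ∧
    PySem.List.pyGet? ((PySem.Str.splitMax? log "-" 1).getD []) 1 ≠ some ""
instance (A : List String) : Decidable (Pre_reorderLogs A) := by unfold Pre_reorderLogs; infer_instance

def pvWitness_reorderLogs : List String := ["g2-act car", "zo4-4 7", "ab1-off key", "a8-act zoo"]

def Spec_reorderLogs (A : List String) (out : List String) : Prop := out = reorderLogs_alt A
instance (A : List String) (out : List String) : Decidable (Spec_reorderLogs A out) := by unfold Spec_reorderLogs; infer_instance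

-- ===== CLAIM (what is proved, stated in full; the proofs are below) =====
def Claim_equal_reorderLogs : Prop := ∀ (A : List String), Dom_reorderLogs A → Pre_reorderLogs A → Spec_reorderLogs A (reorderLogs A)

-- ===== LEMMAS AND PROOFS =====

-- B's comparison function (what sorted2 A altKey1 altKey2 folds with)
def pvBF (a b : String) : Bool :=
  decide (altKey1 a < altKey1 b) || (!decide (altKey1 b < altKey1 a) && decide (altKey2 a < altKey2 b))

-- A's comparison function (what sorted2 letter_logs pvLogContent pvLogIdent folds with)
def pvBFA (a b : String) : Bool :=
  decide (pvLogContent a < pvLogContent b) ||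
    (!decide (pvLogContent b < pvLogContent a) && decide (pvLogIdent a < pvLogIdent b))

theorem pvIsDigitLog_eq (log : String) : pvIsDigitLog log = altIsDigit log := by
  unfold pvIsDigitLog altIsDigit altContent altSplit
  cases h : PySem.List.pyGet? (pvSplit1 log) 1 <;> simp [pvSplit1] at h <;> simp [h]
  rfl

theorem sorted2_eq_foldl {α : Type} (xs : List α) (k1 k2 : α → String) :
    PySem.List.sorted2 xs k1 k2 = xs.foldl (fun acc x => PySem.List.insertBy
      (fun a b => decide (k1 a < k1 b) || (!decide (k1 b < k1 a) && decide (k2 a < k2 b))) x acc) [] := by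
  simp [PySem.List.sorted2]

theorem insertBy_congr {α : Type} (b1 b2 : α → α → Bool) (x : α) (ys : List α)
    (h : ∀ y ∈ ys, b1 x y = b2 x y) : PySem.List.insertBy b1 x ys = PySem.List.insertBy b2 x ys := by
  induction ys with
  | nil => rfl
  | cons y ys ih =>
    simp only [PySem.List.insertBy]
    rw [h y (by simp)]
    split_ifs with hb
    · rfl
    · rw [ih (fun z hz => h z (by simp [hz]))]

theorem insertBy_append {α : Type} (b : α → α → Bool) (x : α) (ys zs : List α)
    (h : ∀ z ∈ zs, b x z = true) :
    PySem.List.insertBy b x (ys ++ zs) = PySem.List.insertBy b x ys ++ zs := by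
  induction ys with
  | nil =>
    cases zs with
    | nil => rfl
    | cons z zs' => simp [PySem.List.insertBy, h z (by simp)]
  | cons y ys ih =>
    simp only [List.cons_append, PySem.List.insertBy]
    split_ifs <;> simp [ih]

theorem charsLt01 (l : List Char) : ('0' :: l) < ['1'] :=
  List.cons_lt_cons_iff.2 (Or.inl (by decide))

theorem charsNot10 (l : List Char) : ¬((['1'] : List Char) < '0' :: l) := by
  rw [List.cons_lt_cons_iff]
  rintro (h | ⟨h, -⟩)
  · exact absurd h (by decide)
  · exact absurd h (by decide)

theorem charsZeroCons_lt (a b : List Char) : (('0' :: a) < ('0' :: b)) ↔ a < b := by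
  rw [List.cons_lt_cons_iff]; simp

-- a digit-log is never strictly before anything under B's key
theorem pvBF_digit (a b : String) (ha : altIsDigit a = true) : pvBF a b = false := by
  unfold pvBF altKey1 altKey2
  rw [ha]
  by_cases hb : altIsDigit b = true
  · simp [hb]
  · simp only [Bool.not_eq_true] at hb
    simp [hb]
    constructor
    · exact not_lt.1 (charsNot10 _)
    · intro h
      exact absurd (charsLt01 _) (not_lt.2 h)

-- a letter-log is strictly before every digit-log under B's key
theorem pvBF_letter_digit (a b : String) (ha : altIsDigit a = false) (hb : altIsDigit b = true) :
    pvBF a b = true := by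
  unfold pvBF altKey1 altKey2
  simp [ha, hb]
  exact charsLt01 _

-- on two letter-logs B's comparison is exactly A's comparison
theorem pvBF_letters (a b : String) (ha : altIsDigit a = false) (hb : altIsDigit b = false) :
    pvBF a b = pvBFA a b := by
  unfold pvBF pvBFA altKey1 altKey2
  have hz : ∀ x y : String, (("0" ++ x : String) < ("0" ++ y : String)) = (x < y) := by
    intro x y
    rw [String.lt_iff_toList_lt, String.toList_append, String.toList_append]
    show (('0' :: x.toList) < ('0' :: y.toList)) = _
    rw [eq_iff_iff, charsZeroCons_lt, String.lt_iff_toList_lt]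
  have hc : ∀ log : String, altContent log = pvLogContent log := fun _ => rfl
  have hi : ∀ log : String, altIdent log = pvLogIdent log := fun _ => rfl
  simp only [ha, hb, Bool.false_eq_true, if_false, hz, hc, hi]
-- B's single fold splits: digit-logs accumulate at the back in input order, letter-logs are
-- insertion-sorted at the front.
theorem fold_split (xs : List String) (SL DL : List String)
    (hDL : ∀ d ∈ DL, altIsDigit d = true) :
    xs.foldl (fun acc x => PySem.List.insertBy pvBF x acc) (SL ++ DL)
      = (xs.filter (fun x => !altIsDigit x)).foldl (fun acc x => PySem.List.insertBy pvBF x acc) SL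
        ++ (DL ++ xs.filter (fun x => altIsDigit x)) := by
  induction xs generalizing SL DL with
  | nil => simp
  | cons x xs ih =>
    by_cases hx : altIsDigit x = true
    · have h1 : PySem.List.insertBy pvBF x (SL ++ DL) = (SL ++ DL) ++ [x] :=
        PySem.List.insertBy_of_forall_not_before _ _ _ (fun y _ => pvBF_digit x y hx)
      have hDL' : ∀ d ∈ DL ++ [x], altIsDigit d = true := by
        intro d hd
        rcases List.mem_append.1 hd with h | h
        · exact hDL d h
        · rw [List.mem_singleton.1 h]; exact hx
      simp only [List.foldl_cons, h1, List.append_assoc]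
      rw [ih SL (DL ++ [x]) hDL']
      simp [hx]
    · simp only [Bool.not_eq_true] at hx
      have h1 : PySem.List.insertBy pvBF x (SL ++ DL) = PySem.List.insertBy pvBF x SL ++ DL :=
        insertBy_append _ _ _ _ (fun d hd => pvBF_letter_digit x d hx (hDL d hd))
      simp only [List.foldl_cons, h1]
      rw [ih (PySem.List.insertBy pvBF x SL) DL hDL]
      simp [hx]

-- over letter-logs only, folding with pvBF is folding with pvBFA
theorem fold_letters (xs : List String) (acc : List String)
    (hxs : ∀ x ∈ xs, altIsDigit x = false) (hacc : ∀ y ∈ acc, altIsDigit y = false) :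
    xs.foldl (fun acc x => PySem.List.insertBy pvBF x acc) acc
      = xs.foldl (fun acc x => PySem.List.insertBy pvBFA x acc) acc := by
  induction xs generalizing acc with
  | nil => rfl
  | cons x xs ih =>
    have hx : altIsDigit x = false := hxs x (by simp)
    have hins : PySem.List.insertBy pvBF x acc = PySem.List.insertBy pvBFA x acc :=
      insertBy_congr _ _ _ _ (fun y hy => pvBF_letters x y hx (hacc y hy))
    simp only [List.foldl_cons, hins]
    exact ih _ (fun z hz => hxs z (by simp [hz]))
      (fun y hy => by
        rcases (PySem.List.mem_insertBy _ _ _ _).1 hy with h | h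
        · rw [h]; exact hx
        · exact hacc y h)

-- ===== VERDICT (by name: the statement is the Claim_ definition above) =====
theorem reorderLogs_spec : Claim_equal_reorderLogs := by
  intro A _ _
  unfold Spec_reorderLogs reorderLogs reorderLogs_alt
  show PySem.List.sorted2
      (A.foldl (fun (acc : List String × List String) log =>
        if pvIsDigitLog log then (acc.1, acc.2 ++ [log]) else (acc.1 ++ [log], acc.2)) ([], [])).1
      pvLogContent pvLogIdent ++
    (A.foldl (fun (acc : List String × List String) log =>
        if pvIsDigitLog log then (acc.1, acc.2 ++ [log]) else (acc.1 ++ [log], acc.2)) ([], [])).2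
    = PySem.List.sorted2 A altKey1 altKey2
  have h1 : A.foldl (fun (acc : List String × List String) log =>
        if pvIsDigitLog log then (acc.1, acc.2 ++ [log]) else (acc.1 ++ [log], acc.2)) ([], [])
      = A.foldl (fun (s : List String × List String) log =>
          (if (!pvIsDigitLog log) = true then s.1 ++ [log] else s.1,
           if pvIsDigitLog log = true then s.2 ++ [log] else s.2)) ([], []) :=
    by exact PySem.List.foldl_congr_mem _ _ _ _
        (by intro acc x _; by_cases h : pvIsDigitLog x = true <;> simp [h])
  have h2 := PySem.List.foldl_prod_mk
      (f := fun s log => if (!pvIsDigitLog log) = true then s ++ [log] else s)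
      (g := fun s log => if pvIsDigitLog log = true then s ++ [log] else s)
      A ([] : List String) ([] : List String)
  rw [h1, h2]
  simp only [PySem.List.foldl_append_if_eq_filter, List.nil_append]
  have hfilter1 : A.filter (fun x => !pvIsDigitLog x) = A.filter (fun x => !altIsDigit x) := by
    apply List.filter_congr; intro x _; rw [pvIsDigitLog_eq]
  have hfilter2 : A.filter (fun x => pvIsDigitLog x) = A.filter (fun x => altIsDigit x) := by
    apply List.filter_congr; intro x _; rw [pvIsDigitLog_eq]
  rw [hfilter1, hfilter2, sorted2_eq_foldl A altKey1 altKey2,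
    show (fun a b => decide (altKey1 a < altKey1 b) ||
        (!decide (altKey1 b < altKey1 a) && decide (altKey2 a < altKey2 b))) = pvBF from rfl]
  have hsplit := fold_split A [] [] (by simp)
  simp only [List.append_nil, List.nil_append] at hsplit
  rw [hsplit, sorted2_eq_foldl,
    show (fun a b => decide (pvLogContent a < pvLogContent b) ||
        (!decide (pvLogContent b < pvLogContent a) && decide (pvLogIdent a < pvLogIdent b))) = pvBFA from rfl,
    fold_letters _ [] (fun x hx => by simpa using (List.mem_filter.1 hx).2) (by simp)]
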